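-- pv_equiv track=rewrite | github.com/gcomneno/pet | tools/partial_signature_probe.py | _residual_compatible_with_status_v0
-- ===== SOURCE A (Python) =====
-- from collections import Counter
-- from typing import Any
--
-- def _freeze(x: Any):
--     if isinstance(x, list):
--         return tuple(_freeze(y) for y in x)
--     return x
--
-- def _canonicalize_signatures(sigs: list[list]) -> list[list]:
--     return sorted(sigs, key=_freeze)
--
-- def _signature_multiset(sigs: list[list]) -> Counter:
--     return Counter(_freeze(sig) for sig in _canonicalize_signatures(sigs))
--
-- def _residual_compatible_with_status_v0(
--     exact_children: list[list],
--     known_children: list[list],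
--     status: str,
-- ) -> bool:
--     exact_counts = _signature_multiset(exact_children)
--     known_counts = _signature_multiset(known_children)
--     residual_size = sum(
--         exact_counts.get(sig, 0) - known_counts.get(sig, 0) for sig in exact_counts
--     )
--
--     if status == "unit":
--         return residual_size == 0
--     if status == "prime-by-sympy":
--         return residual_size == 1
--     if status == "prime-power-by-sympy":
--         return residual_size == 1
--     if status == "composite-non-prime-power":
--         return residual_size >= 2
--     if status == "perfect-power-composite-base":
--         return residual_size >= 2
--     return False
-- ===== SOURCE B (Python) =====
-- def _freeze(x):
--     if isinstance(x, list):
--         return tuple(_freeze(y) for y in x)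
--     return x
--
-- def _residual_compatible_with_status_v0(
--     exact_children: list,
--     known_children: list,
--     status: str,
-- ) -> bool:
--     exact_set = {_freeze(sig) for sig in exact_children}
--     residual_size = len(exact_children) - sum(
--         1 for k in known_children if _freeze(k) in exact_set
--     )
--     if status == "unit":
--         return residual_size == 0
--     if status in ("prime-by-sympy", "prime-power-by-sympy"):
--         return residual_size == 1
--     if status in ("composite-non-prime-power", "perfect-power-composite-base"):
--         return residual_size >= 2
--     return False
-- ===== Notes on version B (the rewrite author's own statement) =====
-- stated objective: faster
-- what changed: Replaces the two sorted Counter multisets and the per-distinct-key subtraction loop by a single membership-counting pass: residual_size = len(exact_children) minus the number of known children whose frozen signature lies in the set of frozen exact signatures.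
import Mathlib
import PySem

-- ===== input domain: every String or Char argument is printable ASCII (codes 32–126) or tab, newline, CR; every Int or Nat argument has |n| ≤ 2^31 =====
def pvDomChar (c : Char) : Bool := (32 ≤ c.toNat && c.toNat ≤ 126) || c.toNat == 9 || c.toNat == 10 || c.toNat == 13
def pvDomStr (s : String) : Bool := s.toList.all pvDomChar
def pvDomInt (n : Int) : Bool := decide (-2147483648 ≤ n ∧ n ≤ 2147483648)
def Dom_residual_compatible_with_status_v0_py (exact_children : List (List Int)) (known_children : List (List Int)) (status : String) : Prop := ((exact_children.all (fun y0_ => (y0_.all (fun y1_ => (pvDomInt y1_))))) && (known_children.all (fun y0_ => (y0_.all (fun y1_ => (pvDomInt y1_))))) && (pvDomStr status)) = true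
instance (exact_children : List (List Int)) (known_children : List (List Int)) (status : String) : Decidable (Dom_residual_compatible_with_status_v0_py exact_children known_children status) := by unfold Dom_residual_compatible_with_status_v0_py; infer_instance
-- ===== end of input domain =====

-- B replaces the two sorted-Counter multisets and the per-key subtraction loop by one
-- membership-counting pass over known_children against a set of exact signatures (measured faster).

-- ===== PORT A =====
-- _freeze on a list[int] returns the tuple of its ints; as a dict/set key that tuple is
-- value-identical to the list, so on this input type the port is the identity on List Int.
def pvFreeze (x : List Int) : List Int := x

-- _canonicalize_signatures: sorted(sigs, key=_freeze)
def pvCanonicalize (sigs : List (List Int)) : List (List Int) :=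
  PySem.List.sorted sigs pvFreeze false

-- _signature_multiset: Counter(_freeze(sig) for sig in _canonicalize_signatures(sigs))
def pvSignatureMultiset (sigs : List (List Int)) : PySem.Dict (List Int) Int :=
  PySem.Dict.counter ((pvCanonicalize sigs).map pvFreeze)

def residual_compatible_with_status_v0_py (exact_children : List (List Int)) (known_children : List (List Int)) (status : String) : Bool :=
  let exact_counts := pvSignatureMultiset exact_children
  let known_counts := pvSignatureMultiset known_children
  -- sum(exact_counts.get(sig, 0) - known_counts.get(sig, 0) for sig in exact_counts)
  let residual_size : Int :=
    exact_counts.keys.foldl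
      (fun acc sig => acc + (exact_counts.getD sig 0 - known_counts.getD sig 0)) 0
  if status == "unit" then residual_size == 0
  else if status == "prime-by-sympy" then residual_size == 1
  else if status == "prime-power-by-sympy" then residual_size == 1
  else if status == "composite-non-prime-power" then decide (2 ≤ residual_size)
  else if status == "perfect-power-composite-base" then decide (2 ≤ residual_size)
  else false

-- ===== PORT B =====
def residual_compatible_with_status_v0_py_alt (exact_children : List (List Int)) (known_children : List (List Int)) (status : String) : Bool :=
  let exact_set : PySem.Set (List Int) := PySem.Set.ofList (exact_children.map pvFreeze)
  -- len(exact_children) - sum(1 for k in known_children if _freeze(k) in exact_set)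
  let residual_size : Int :=
    (exact_children.length : Int)
      - (known_children.countP (fun k => decide (pvFreeze k ∈ exact_set)) : Int)
  if status == "unit" then residual_size == 0
  else if status == "prime-by-sympy" || status == "prime-power-by-sympy" then residual_size == 1
  else if status == "composite-non-prime-power" || status == "perfect-power-composite-base" then decide (2 ≤ residual_size)
  else false

-- ===== PRECONDITION & SPEC =====
def Spec_residual_compatible_with_status_v0_py (exact_children : List (List Int)) (known_children : List (List Int)) (status : String) (out : Bool) : Prop := out = residual_compatible_with_status_v0_py_alt exact_children known_children status
instance (exact_children : List (List Int)) (known_children : List (List Int)) (status : String) (out : Bool) : Decidable (Spec_residual_compatible_with_status_v0_py exact_children known_children status out) := by unfold Spec_residual_compatible_with_status_v0_py; infer_instance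

-- ===== CLAIM (what is proved, stated in full; the proofs are below) =====
def Claim_equal_residual_compatible_with_status_v0_py : Prop := ∀ (exact_children : List (List Int)) (known_children : List (List Int)) (status : String), Dom_residual_compatible_with_status_v0_py exact_children known_children status → Spec_residual_compatible_with_status_v0_py exact_children known_children status (residual_compatible_with_status_v0_py exact_children known_children status)

-- ===== LEMMAS AND PROOFS =====

-- Σ_{s ∈ S} L.count s = number of elements of L lying in S, for any Nodup S.
lemma sum_counts_eq_countP (S : List (List Int)) (L : List (List Int)) (hS : S.Nodup) :
    (S.map (fun s => (L.count s : Int))).sum = (L.countP (fun x => decide (x ∈ S)) : Int) := by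
  induction L with
  | nil => simp
  | cons x L ih =>
    have hcount : ∀ s : List Int, ((x :: L).count s : Int)
        = (L.count s : Int) + (if s = x then (1 : Int) else 0) := by
      intro s
      by_cases h : s = x
      · subst h; simp
      · simp [List.count_cons, h]
        exact fun hh => h hh.symm
    have hsplit : (S.map (fun s => ((x :: L).count s : Int))).sum
        = (S.map (fun s => (L.count s : Int))).sum
          + (S.map (fun s => if s = x then (1 : Int) else 0)).sum := by
      rw [← PySem.List.sum_map_add_int]
      exact congrArg List.sum (List.map_congr_left (fun s _ => hcount s))
    have hind : (S.map (fun s => if s = x then (1 : Int) else 0)).sum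
        = if x ∈ S then (1 : Int) else 0 := by
      have : (S.map (fun s => if s = x then (1 : Int) else 0)).sum
          = (S.countP (fun s => decide (s = x)) : Int) := by
        simpa using PySem.List.sum_map_ite_one_zero (fun s => s = x) S
      rw [this]
      by_cases hx : x ∈ S
      · rw [if_pos hx]
        have hcc : S.countP (fun s => decide (s = x)) = S.count x := by
          rw [List.count]; exact List.countP_congr (fun s _ => by simp)
        rw [hcc, List.count_eq_one_of_mem hS hx]; norm_num
      · rw [if_neg hx]
        have hcc : S.countP (fun s => decide (s = x)) = S.count x := by
          rw [List.count]; exact List.countP_congr (fun s _ => by simp)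
        rw [hcc, List.count_eq_zero_of_not_mem hx]; norm_num
    rw [hsplit, ih, hind, List.countP_cons]
    by_cases hx : x ∈ S
    · rw [if_pos hx]; simp [hx]
    · rw [if_neg hx]; simp [hx]
  
-- A's residual loop computes B's residual expression.
lemma residual_eq (e k : List (List Int)) :
    (pvSignatureMultiset e).keys.foldl
      (fun acc sig => acc + ((pvSignatureMultiset e).getD sig 0 - (pvSignatureMultiset k).getD sig 0)) 0
    = (e.length : Int)
      - (k.countP (fun s => decide (pvFreeze s ∈ PySem.Set.ofList (e.map pvFreeze))) : Int) := by
  have hfreeze : ∀ l : List (List Int), l.map pvFreeze = l := by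
    intro l; rw [show pvFreeze = id from rfl, List.map_id]
  have he : (pvCanonicalize e).map pvFreeze = PySem.List.sorted e pvFreeze false := by
    rw [pvCanonicalize, hfreeze]
  have hk : (pvCanonicalize k).map pvFreeze = PySem.List.sorted k pvFreeze false := by
    rw [pvCanonicalize, hfreeze]
  have hpe : (PySem.List.sorted e pvFreeze false).Perm e := PySem.List.sorted_perm e pvFreeze false
  have hpk : (PySem.List.sorted k pvFreeze false).Perm k := PySem.List.sorted_perm k pvFreeze false
  set S : List (List Int) := PySem.Set.ofList (PySem.List.sorted e pvFreeze false) with hSdef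
  have hkeys : (pvSignatureMultiset e).keys = S := by
    rw [pvSignatureMultiset, PySem.Dict.keys_counter, he]
  have hSnodup : S.Nodup := PySem.Set.nodup_ofList _
  have hmemS : ∀ x : List Int, x ∈ S ↔ x ∈ e := by
    intro x
    rw [hSdef, PySem.Set.mem_ofList]
    exact hpe.mem_iff
  -- turn the fold into a sum over S
  rw [hkeys, PySem.List.foldl_add
    (g := fun sig => (pvSignatureMultiset e).getD sig 0 - (pvSignatureMultiset k).getD sig 0)]
  have hgetE : ∀ sig, (pvSignatureMultiset e).getD sig 0 = (e.count sig : Int) := by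
    intro sig
    rw [pvSignatureMultiset, PySem.Dict.getD_counter, he, hpe.count_eq]
  have hgetK : ∀ sig, (pvSignatureMultiset k).getD sig 0 = (k.count sig : Int) := by
    intro sig
    rw [pvSignatureMultiset, PySem.Dict.getD_counter, hk, hpk.count_eq]
  have hmap : S.map (fun sig => (pvSignatureMultiset e).getD sig 0 - (pvSignatureMultiset k).getD sig 0)
      = S.map (fun sig => (e.count sig : Int) - (k.count sig : Int)) :=
    List.map_congr_left (fun sig _ => by rw [hgetE, hgetK])
  rw [hmap]
  have hsub : (S.map (fun sig => (e.count sig : Int) - (k.count sig : Int))).sum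
      = (S.map (fun sig => (e.count sig : Int))).sum - (S.map (fun sig => (k.count sig : Int))).sum := by
    induction S with
    | nil => simp
    | cons a S ih => simp [ih]; ring
  rw [hsub, sum_counts_eq_countP S e hSnodup, sum_counts_eq_countP S k hSnodup]
  have hcE : e.countP (fun x => decide (x ∈ S)) = e.length :=
    List.countP_eq_length.mpr (fun x hx => by simp [hmemS x, hx])
  have hcK : k.countP (fun x => decide (x ∈ S))
      = k.countP (fun s => decide (pvFreeze s ∈ PySem.Set.ofList (e.map pvFreeze))) :=
    List.countP_congr (fun x _ => by
      simp [pvFreeze, hfreeze, hmemS x, PySem.Set.mem_ofList])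
  rw [hcE, hcK]
  ring

-- ===== VERDICT (by name: the statement is the Claim_ definition above) =====
theorem residual_compatible_with_status_v0_py_spec : Claim_equal_residual_compatible_with_status_v0_py := by
  intro e k status _
  unfold Spec_residual_compatible_with_status_v0_py
  unfold residual_compatible_with_status_v0_py residual_compatible_with_status_v0_py_alt
  simp only [residual_eq e k, beq_iff_eq, Bool.or_eq_true]
  split_ifs <;> simp_all
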